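-- pv_equiv track=rewrite | github.com/Nandan-unni/CUSAT-Lab-Works | S7-NW-Lab/HammingCode/encode.py | pos_of_redundant_bits
-- ===== SOURCE A (Python) =====
-- def pos_of_redundant_bits(msg, rbits):
--     pos_pow = 0
--     pos_from_last = 1
--     m = len(msg)
--     new_msg = ""
--
--     for i in range(1, m + rbits + 1):
--         if i == 2**pos_pow:
--             # filling reduntant bit pos with "x"
--             new_msg = new_msg + "x"
--             pos_pow += 1
--         else:
--             new_msg = new_msg + msg[-1 * pos_from_last]
--             pos_from_last += 1
--
--     return new_msg[::-1]
-- ===== SOURCE B (Python) =====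
-- def pos_of_redundant_bits(msg, rbits):
--     # Block decomposition: between consecutive power-of-two positions (counted
--     # from the right) lies a contiguous run of data characters, so the frame is
--     # assembled from O(log n) slices of msg instead of a per-position loop.
--     n = len(msg) + rbits
--     if n <= 0:
--         return ""
--     t = n.bit_length()
--     rest = msg[len(msg) - (n - t):]
--     pieces = [rest[:n - (1 << (t - 1))]]
--     rest = rest[n - (1 << (t - 1)):]
--     e = 1 << (t - 1)
--     while e >= 1:
--         L = (e - 1) - e // 2
--         pieces.append("x" + rest[:L])
--         rest = rest[L:]
--         e //= 2
--     return "".join(pieces)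
-- ===== Notes on version B (the rewrite author's own statement) =====
-- stated objective: alternative
-- what changed: B uses a block decomposition: it observes that between consecutive power-of-two positions (from the right) lies one contiguous run of message characters, so it assembles the frame from O(log n) slices of msg joined around the 'x' markers, instead of A's per-position loop with a power counter, end-relative indexing and a final reversal.
import Mathlib
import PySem

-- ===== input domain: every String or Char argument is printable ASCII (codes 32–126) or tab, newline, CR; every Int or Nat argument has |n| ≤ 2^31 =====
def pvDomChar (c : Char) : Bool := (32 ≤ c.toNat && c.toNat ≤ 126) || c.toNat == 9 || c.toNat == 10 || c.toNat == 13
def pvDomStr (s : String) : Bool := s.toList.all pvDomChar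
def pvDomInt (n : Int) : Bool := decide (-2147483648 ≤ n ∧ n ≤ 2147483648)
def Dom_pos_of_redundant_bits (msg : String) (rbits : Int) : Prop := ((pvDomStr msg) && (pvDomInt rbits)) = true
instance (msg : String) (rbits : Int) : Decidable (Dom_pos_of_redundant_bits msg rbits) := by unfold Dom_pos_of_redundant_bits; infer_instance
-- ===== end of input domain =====

-- B assembles the frame from O(log n) blocks (the runs of data characters between
-- consecutive power-of-two positions from the right), slicing msg instead of
-- looping position by position; objective: alternative (block algorithm, not faster at these sizes).

-- ===== PORT A =====
-- loop state = (pos_pow, pos_from_last, new_msg); strings handled as char lists.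
-- pos_pow is a nonnegative counter starting at 0, kept as Nat (the exponent of 2**pos_pow).
def pvStepA (L : List Char) (st : Nat × Int × List Char) (i : Int) : Nat × Int × List Char :=
  if i == (2 : Int) ^ st.1 then (st.1 + 1, st.2.1, st.2.2 ++ ['x'])
  else
    match PySem.List.pyGet? L (-1 * st.2.1) with
    | some c => (st.1, st.2.1 + 1, st.2.2 ++ [c])
    | none => (st.1, st.2.1 + 1, st.2.2)  -- msg[-pos_from_last] raises IndexError: excluded by Pre_

def pos_of_redundant_bits (msg : String) (rbits : Int) : String :=
  let L := msg.toList
  let st := (PySem.List.pyRange 1 ((L.length : Int) + rbits + 1) 1).foldl (pvStepA L) (0, 1, [])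
  String.mk st.2.2.reverse  -- new_msg[::-1] (PySem.List.slice?_none_none_neg_one: [::-1] is reverse)

-- ===== PORT B =====
-- the while loop of Source B: while e >= 1, emit 'x' plus the next (e-1) - e//2 data
-- characters (nonnegative slices rest[:L] / rest[L:] are take/drop, exact), e //= 2.
-- The joined pieces are produced directly as one char list.
def pvChunks : Nat → List Char → List Char
  | e, rest =>
    if h : e = 0 then []
    else
      let l := (e - 1) - e / 2
      'x' :: (rest.take l ++ pvChunks (e / 2) (rest.drop l))
  decreasing_by exact Nat.div_lt_self (Nat.pos_of_ne_zero h) (by norm_num)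

def pos_of_redundant_bits_alt (msg : String) (rbits : Int) : String :=
  let L := msg.toList
  let n : Int := (L.length : Int) + rbits
  if n ≤ 0 then "" else
    let t := PySem.Int.bitLength n
    let rest := PySem.List.slice L (some ((L.length : Int) - (n - (t : Int)))) none
    let h : Int := n - ((2 ^ (t - 1) : Nat) : Int)
    String.mk (PySem.List.slice rest none (some h) ++
      pvChunks (2 ^ (t - 1)) (PySem.List.slice rest (some h) none))

-- ===== PRECONDITION & SPEC =====
-- Pre_ excludes exactly the inputs where A raises IndexError: more non-power positions than
-- message characters, i.e. n > 0 and rbits > n.bit_length() with n = len(msg) + rbits.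
def Pre_pos_of_redundant_bits (msg : String) (rbits : Int) : Prop :=
  (msg.toList.length : Int) + rbits ≤ 0 ∨
    rbits ≤ (PySem.Int.bitLength ((msg.toList.length : Int) + rbits) : Int)
instance (msg : String) (rbits : Int) : Decidable (Pre_pos_of_redundant_bits msg rbits) := by
  unfold Pre_pos_of_redundant_bits; infer_instance

def pvWitness_pos_of_redundant_bits : String × Int := ("data", 3)

def Spec_pos_of_redundant_bits (msg : String) (rbits : Int) (out : String) : Prop := out = pos_of_redundant_bits_alt msg rbits
instance (msg : String) (rbits : Int) (out : String) : Decidable (Spec_pos_of_redundant_bits msg rbits out) := by unfold Spec_pos_of_redundant_bits; infer_instance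

-- ===== CLAIM (what is proved, stated in full; the proofs are below) =====
def Claim_equal_pos_of_redundant_bits : Prop := ∀ (msg : String) (rbits : Int), Dom_pos_of_redundant_bits msg rbits → Pre_pos_of_redundant_bits msg rbits → Spec_pos_of_redundant_bits msg rbits (pos_of_redundant_bits msg rbits)

-- ===== LEMMAS AND PROOFS =====

-- proof-only helper: the per-position characterisation of A's loop output, read
-- left-to-right over the countdown of positions ('x' at powers of two, else the
-- next data character); both ports are related to it.
def pvBuild : List Int → List Char → List Char
  | [], _ => []
  | v :: vs, data =>
    if PySem.Int.band v (v - 1) == 0 then 'x' :: pvBuild vs data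
    else
      match data with
      | [] => []
      | c :: rest => c :: pvBuild vs rest

-- PySem.Int.bitLength of a natural number is Nat.size
lemma pvBitLen_eq_size (j : Nat) : PySem.Int.bitLength (j : Int) = Nat.size j := by
  rcases Nat.eq_zero_or_pos j with h0 | hpos
  · subst h0; simp [PySem.Int.bitLength_zero]
  · apply le_antisymm
    · by_contra hlt
      have h1 : 2 ^ (PySem.Int.bitLength (j : Int) - 1) ≤ j := by
        have := PySem.Int.two_pow_bitLength_le (j : Int) (by exact_mod_cast hpos.ne')
        simpa using this
      have h2 : j < 2 ^ Nat.size j := Nat.lt_size_self j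
      have h3 : Nat.size j ≤ PySem.Int.bitLength (j : Int) - 1 := by omega
      have := Nat.pow_le_pow_right (by norm_num : 0 < 2) h3
      omega
    · rw [Nat.size_le]
      have := PySem.Int.lt_two_pow_bitLength (j : Int)
      simpa using this

-- size steps along the loop: the counter pos_pow tracks Nat.size
lemma pvSize_succ_pow {k : Nat} (h : k + 1 = 2 ^ Nat.size k) :
    Nat.size (k + 1) = Nat.size k + 1 := by rw [h, Nat.size_pow]

lemma pvSize_succ_nonpow {k : Nat} (h : k + 1 ≠ 2 ^ Nat.size k) :
    Nat.size (k + 1) = Nat.size k := by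
  have h1 : k < 2 ^ Nat.size k := Nat.lt_size_self k
  have h2 : k + 1 < 2 ^ Nat.size k := by omega
  exact le_antisymm (Nat.size_le.mpr h2) (Nat.size_le_size (by omega))

lemma pvSize_le_self (k : Nat) : Nat.size k ≤ k := Nat.size_le.mpr Nat.lt_two_pow_self

lemma pvTestBit_of_bounds {n j : Nat} (h1 : 2 ^ j ≤ n) (h2 : n < 2 ^ (j + 1)) :
    n.testBit j = true := by
  have hd : n / 2 ^ j = 1 := Nat.div_eq_of_lt_le (by omega) (by rw [pow_succ] at h2; omega)
  simp [Nat.testBit_eq_decide_div_mod_eq, hd]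

-- the bit trick: (k+1) & k == 0 iff k+1 is the power of two A's counter expects
lemma pvPow_iff (k : Nat) : (k + 1) &&& k = 0 ↔ k + 1 = 2 ^ Nat.size k := by
  constructor
  · intro h
    set j := Nat.size (k + 1) - 1 with hj
    have hs : 0 < Nat.size (k + 1) := Nat.size_pos.mpr (by omega)
    have hlo : 2 ^ j ≤ k + 1 := Nat.lt_size.mp (by omega)
    have hhi : k + 1 < 2 ^ (j + 1) := by
      have : Nat.size (k + 1) ≤ j + 1 := by omega
      exact lt_of_lt_of_le (Nat.lt_size_self (k + 1)) (Nat.pow_le_pow_right (by norm_num) this)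
    have heq : k + 1 = 2 ^ j := by
      by_contra hne
      have hk1 : 2 ^ j ≤ k := by omega
      have ht1 : (k + 1).testBit j = true := pvTestBit_of_bounds hlo hhi
      have ht2 : k.testBit j = true := pvTestBit_of_bounds hk1 (by omega)
      have hb : ((k + 1) &&& k).testBit j = true := by rw [Nat.testBit_and, ht1, ht2]; rfl
      rw [h, Nat.zero_testBit] at hb
      exact Bool.false_ne_true hb
    have hsk : Nat.size k = j := by
      rcases Nat.eq_zero_or_pos j with hz | hp
      · have hk0 : k = 0 := by rw [hz] at heq; omega
        simp [hk0, hz, Nat.size_zero]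
      · apply le_antisymm
        · rw [Nat.size_le]; omega
        · have hle : 2 ^ (j - 1) ≤ k := by
            have h2 : 2 ^ (j - 1) * 2 = 2 ^ j := by
              rw [← pow_succ]; congr 1; omega
            omega
          have := Nat.lt_size.mpr hle
          omega
    rw [hsk]; exact heq
  · intro h
    obtain ⟨j, hj⟩ : ∃ j, k + 1 = 2 ^ j := ⟨Nat.size k, h⟩
    have hk2 : k = 2 ^ j - 1 := by omega
    rw [hj, hk2]
    apply Nat.eq_of_testBit_eq
    intro i
    rw [Nat.testBit_and, Nat.testBit_two_pow, Nat.testBit_two_pow_sub_one, Nat.zero_testBit]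
    by_cases hij : j = i
    · subst hij; simp
    · simp [hij]

-- pvBuild's test on the cast successor decides the same condition as A's counter test
lemma pvBandTest (k : Nat) :
    (PySem.Int.band (((k + 1 : Nat) : Int)) ((((k + 1 : Nat) : Int)) - 1) == 0) =
      decide (k + 1 = 2 ^ Nat.size k) := by
  have h2 : (((k + 1 : Nat) : Int)) - 1 = ((k : Nat) : Int) := by push_cast; ring
  rw [h2, PySem.Int.band_natCast]
  by_cases h : (k + 1) &&& k = 0
  · rw [h]; simp [(pvPow_iff k).mp h]
  · have hne : ¬ (k + 1 = 2 ^ Nat.size k) := fun hc => h ((pvPow_iff k).mpr hc)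
    simp [h, hne]

-- A's loop test on the cast successor decides the same condition
lemma pvIntTest (k : Nat) :
    (((k : Int) + 1) == (2 : Int) ^ Nat.size k) = decide (k + 1 = 2 ^ Nat.size k) := by
  by_cases h : k + 1 = 2 ^ Nat.size k
  · have hi : ((k : Int) + 1) = (2 : Int) ^ Nat.size k := by exact_mod_cast h
    simp [h, hi]
  · have hi : ¬ (((k : Int) + 1) = (2 : Int) ^ Nat.size k) :=
      fun hc => h (by exact_mod_cast hc)
    simp [h, hi]

-- unfolding equation for pvBuild on a cons
lemma pvBuild_cons (v : Int) (vs : List Int) (data : List Char) :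
    pvBuild (v :: vs) data =
      if PySem.Int.band v (v - 1) == 0 then 'x' :: pvBuild vs data
      else
        match data with
        | [] => []
        | c :: rest => c :: pvBuild vs rest := rfl

-- unfolding equation for pvChunks at a nonzero e
lemma pvChunks_pos (e : Nat) (he : e ≠ 0) (rest : List Char) :
    pvChunks e rest =
      'x' :: (rest.take ((e - 1) - e / 2) ++ pvChunks (e / 2) (rest.drop ((e - 1) - e / 2))) := by
  rw [pvChunks]; simp [he]

-- the main invariant: after the first k loop iterations A's state is
-- (Nat.size k, 1 + (k - size k), reverse of pvBuild over the countdown k..1)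
lemma pvMain (L : List Char) (k : Nat) (hk : k - Nat.size k ≤ L.length) :
    (PySem.List.pyRange 1 ((k : Int) + 1) 1).foldl (pvStepA L) (0, 1, []) =
      (Nat.size k, 1 + ((k - Nat.size k : Nat) : Int),
        (pvBuild (PySem.List.pyRange (k : Int) 0 (-1))
          (L.drop (L.length - (k - Nat.size k)))).reverse) := by
  induction k with
  | zero =>
    rw [PySem.List.pyRange_one_eq_nil (by norm_num), PySem.List.pyRange_neg_one_eq_nil (by norm_num)]
    simp [pvBuild, Nat.size_zero]
  | succ k ih =>
    have hmono : k - Nat.size k ≤ k + 1 - Nat.size (k + 1) := by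
      by_cases hp : k + 1 = 2 ^ Nat.size k
      · rw [pvSize_succ_pow hp]; omega
      · rw [pvSize_succ_nonpow hp]
        have := Nat.size_le_size (Nat.le_succ k)
        omega
    have ih' := ih (le_trans hmono hk)
    have hcast : (((k + 1 : Nat) : Int)) + 1 = ((k : Int) + 1) + 1 := by push_cast; ring
    rw [hcast, PySem.List.pyRange_one_succ_right (by omega), List.foldl_append, ih']
    simp only [List.foldl_cons, List.foldl_nil, pvStepA]
    rw [PySem.List.pyRange_neg_one_cons (show (0 : Int) < ((k + 1 : Nat) : Int) by push_cast; omega)]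
    have hsub : (((k + 1 : Nat) : Int)) - 1 = ((k : Nat) : Int) := by push_cast; ring
    rw [hsub, pvBuild_cons]
    by_cases hp : k + 1 = 2 ^ Nat.size k
    · have hcnt : k + 1 - Nat.size (k + 1) = k - Nat.size k := by
        rw [pvSize_succ_pow hp]; omega
      rw [if_pos (show (((k : Int) + 1) == (2 : Int) ^ Nat.size k) = true by
            rw [pvIntTest]; exact decide_eq_true hp),
          if_pos (show (PySem.Int.band (((k + 1 : Nat) : Int))
              ((((k + 1 : Nat) : Int)) - 1) == 0) = true by
            rw [pvBandTest]; exact decide_eq_true hp)]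
      rw [hcnt, pvSize_succ_pow hp, List.reverse_cons]
    · have hsz : Nat.size (k + 1) = Nat.size k := pvSize_succ_nonpow hp
      have hsk : Nat.size k ≤ k := pvSize_le_self k
      have hcnt : k + 1 - Nat.size (k + 1) = (k - Nat.size k) + 1 := by rw [hsz]; omega
      have hq : k - Nat.size k + 1 ≤ L.length := by omega
      have hidx : -1 * (1 + ((k - Nat.size k : Nat) : Int)) =
          -(((k - Nat.size k + 1 : Nat) : Int)) := by push_cast; ring
      rw [if_neg (show ¬ ((((k : Int) + 1) == (2 : Int) ^ Nat.size k) = true) by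
            rw [pvIntTest]; simp [hp]),
          if_neg (show ¬ ((PySem.Int.band (((k + 1 : Nat) : Int))
              ((((k + 1 : Nat) : Int)) - 1) == 0) = true) by
            rw [pvBandTest]; simp [hp])]
      rw [hcnt,
        List.drop_eq_getElem_cons (show L.length - (k - Nat.size k + 1) < L.length by omega),
        show L.length - (k - Nat.size k + 1) + 1 = L.length - (k - Nat.size k) by omega]
      rw [hidx, PySem.List.pyGet?_neg_natCast L _ (by omega) hq,
        List.getElem?_eq_getElem (show L.length - (k - Nat.size k + 1) < L.length by omega)]
      simp only [List.reverse_cons, hsz]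
      refine Prod.ext rfl (Prod.ext ?_ ?_)
      · push_cast; ring
      · rfl

-- run of non-power positions: counting down from n = 2^(t-1) + k (k data positions
-- above the highest power), pvBuild copies k data characters and continues at 2^(t-1)
lemma pvRun (t : Nat) (k : Nat) : ∀ (n : Nat) (data : List Char),
    n = 2 ^ (t - 1) + k → n < 2 ^ t → 1 ≤ t → k ≤ data.length →
    pvBuild (PySem.List.pyRange (n : Int) 0 (-1)) data =
      data.take k ++ pvBuild (PySem.List.pyRange ((2 ^ (t - 1) : Nat) : Int) 0 (-1)) (data.drop k) := by
  induction k with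
  | zero => intro n data hn _ _ _; subst hn; simp
  | succ k ih =>
    intro n data hn h2 ht hd
    have hpos : 0 < n := by have := Nat.two_pow_pos (t - 1); omega
    obtain ⟨c, rest, hdata⟩ : ∃ c rest, data = c :: rest := by
      cases data with
      | nil => simp at hd
      | cons c rest => exact ⟨c, rest, rfl⟩
    subst hdata
    rw [PySem.List.pyRange_neg_one_cons (show (0 : Int) < (n : Int) by exact_mod_cast hpos)]
    have hm : n = (n - 1) + 1 := by omega
    have hsz : Nat.size (n - 1) = t := by
      apply le_antisymm
      · rw [Nat.size_le]; omega
      · have : 2 ^ (t - 1) ≤ n - 1 := by omega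
        have := Nat.lt_size.mpr this
        omega
    have hnp : ¬ (n - 1 + 1 = 2 ^ Nat.size (n - 1)) := by rw [hsz]; omega
    have hc : ((n : Nat) : Int) = (((n - 1 : Nat) + 1 : Nat) : Int) := by omega
    rw [hc, pvBuild_cons,
      if_neg (show ¬ ((PySem.Int.band ((((n - 1 : Nat) + 1 : Nat) : Int))
          (((((n - 1 : Nat) + 1 : Nat) : Int)) - 1) == 0) = true) by
        rw [pvBandTest]; simp [hnp])]
    have hc2 : (((n - 1 : Nat) + 1 : Nat) : Int) - 1 = ((n - 1 : Nat) : Int) := by push_cast; ring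
    rw [hc2]
    have hih := ih (n - 1) rest (by omega) (by omega) ht (by simpa using Nat.le_of_succ_le_succ hd)
    show c :: pvBuild (PySem.List.pyRange ((n - 1 : Nat) : Int) 0 (-1)) rest =
      List.take (k + 1) (c :: rest) ++
        pvBuild (PySem.List.pyRange ((2 ^ (t - 1) : Nat) : Int) 0 (-1)) (List.drop (k + 1) (c :: rest))
    simp only [List.take_succ_cons, List.drop_succ_cons, List.cons_append]
    exact congrArg _ hih

-- the block decomposition: counting down from a power of two 2^j, pvBuild's output
-- is exactly the chunked form pvChunks produces
lemma pvBlock (j : Nat) : ∀ (data : List Char), 2 ^ j - (j + 1) ≤ data.length →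
    pvBuild (PySem.List.pyRange ((2 ^ j : Nat) : Int) 0 (-1)) data = pvChunks (2 ^ j) data := by
  induction j with
  | zero =>
    intro data _
    simp only [pow_zero]
    rw [pvChunks_pos 1 (by norm_num)]
    rw [show ((1 : Nat) : Int) = 1 by norm_num,
      PySem.List.pyRange_neg_one_cons (by norm_num : (0 : Int) < 1), pvBuild_cons,
      if_pos (by decide : (PySem.Int.band (1 : Int) ((1 : Int) - 1) == 0) = true)]
    rw [PySem.List.pyRange_neg_one_eq_nil (by norm_num)]
    simp [pvBuild, pvChunks]
  | succ j ih =>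
    intro data hd
    have hppos : 0 < 2 ^ (j + 1) := Nat.two_pow_pos _
    have hjp : 0 < 2 ^ j := Nat.two_pow_pos _
    have hjlt : j < 2 ^ j := Nat.lt_two_pow_self
    rw [PySem.List.pyRange_neg_one_cons (show (0 : Int) < ((2 ^ (j + 1) : Nat) : Int) by
      exact_mod_cast hppos)]
    have hm : 2 ^ (j + 1) = (2 ^ (j + 1) - 1) + 1 := by omega
    have hsz : Nat.size (2 ^ (j + 1) - 1) = j + 1 := by
      apply le_antisymm
      · rw [Nat.size_le]; omega
      · have hle : 2 ^ j ≤ 2 ^ (j + 1) - 1 := by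
          have : 2 ^ j + 2 ^ j = 2 ^ (j + 1) := by rw [pow_succ]; ring
          omega
        have := Nat.lt_size.mpr hle
        omega
    have hpw : (2 ^ (j + 1) - 1) + 1 = 2 ^ Nat.size (2 ^ (j + 1) - 1) := by rw [hsz]; omega
    have hc : ((2 ^ (j + 1) : Nat) : Int) = (((2 ^ (j + 1) - 1 : Nat) + 1 : Nat) : Int) := by omega
    rw [hc, pvBuild_cons,
      if_pos (show (PySem.Int.band ((((2 ^ (j + 1) - 1 : Nat) + 1 : Nat) : Int))
          (((((2 ^ (j + 1) - 1 : Nat) + 1 : Nat) : Int)) - 1) == 0) = true by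
        rw [pvBandTest]; exact decide_eq_true hpw)]
    have hc2 : ((((2 ^ (j + 1) - 1 : Nat) + 1 : Nat) : Int)) - 1 = ((2 ^ (j + 1) - 1 : Nat) : Int) := by
      push_cast; ring
    rw [hc2]
    -- the run of 2^j - 1 data positions down to the next power 2^j
    have hk : 2 ^ (j + 1) - 1 = 2 ^ j + (2 ^ j - 1) := by
      have : 2 ^ j + 2 ^ j = 2 ^ (j + 1) := by rw [pow_succ]; ring
      omega
    have hdlen : 2 ^ j - 1 ≤ data.length := by
      have : 2 ^ j + 2 ^ j = 2 ^ (j + 1) := by rw [pow_succ]; ring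
      omega
    rw [pvRun (j + 1) (2 ^ j - 1) (2 ^ (j + 1) - 1) data (by simpa using hk) (by omega)
      (by omega) hdlen]
    simp only [Nat.add_sub_cancel]
    have hrec := ih (data.drop (2 ^ j - 1)) (by
      rw [List.length_drop]
      have : 2 ^ j + 2 ^ j = 2 ^ (j + 1) := by rw [pow_succ]; ring
      omega)
    rw [hrec, pvChunks_pos (2 ^ (j + 1)) (by omega)]
    have hL : (2 ^ (j + 1) - 1) - 2 ^ (j + 1) / 2 = 2 ^ j - 1 := by
      have h2 : 2 ^ (j + 1) / 2 = 2 ^ j := by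
        rw [pow_succ, Nat.mul_div_cancel _ (by norm_num : 0 < 2)]
      rw [h2]
      have : 2 ^ j + 2 ^ j = 2 ^ (j + 1) := by rw [pow_succ]; ring
      omega
    have h2 : 2 ^ (j + 1) / 2 = 2 ^ j := by
      rw [pow_succ, Nat.mul_div_cancel _ (by norm_num : 0 < 2)]
    rw [hL, h2]

-- t ≤ 2^(t-1) for t ≥ 1
lemma pvT_le_pow (t : Nat) (ht : 1 ≤ t) : t ≤ 2 ^ (t - 1) := by
  have := Nat.lt_two_pow_self (n := t - 1)
  omega

-- ===== VERDICT (by name: the statement is the Claim_ definition above) =====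
theorem pos_of_redundant_bits_spec : Claim_equal_pos_of_redundant_bits := by
  intro msg rbits hdom hpre
  unfold Spec_pos_of_redundant_bits
  simp only [pos_of_redundant_bits, pos_of_redundant_bits_alt]
  by_cases hn : ((msg.toList.length : Int)) + rbits ≤ 0
  · rw [PySem.List.pyRange_one_eq_nil (by omega), if_pos hn]
    rfl
  · have hn0 : (((((msg.toList.length : Int)) + rbits).toNat : Nat) : Int) =
        ((msg.toList.length : Int)) + rbits := Int.toNat_of_nonneg (by omega)
    set n0 : Nat := (((msg.toList.length : Int)) + rbits).toNat with hdef
    have hbl : PySem.Int.bitLength (((msg.toList.length : Int)) + rbits) = Nat.size n0 := by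
      rw [← hn0, pvBitLen_eq_size]
    have hpre' : rbits ≤ (Nat.size n0 : Int) := by
      rcases hpre with h | h
      · omega
      · rw [hbl] at h; exact h
    have hsk : Nat.size n0 ≤ n0 := pvSize_le_self n0
    set t : Nat := Nat.size n0 with htdef
    have hn0pos : 0 < n0 := by omega
    have ht1 : 1 ≤ t := Nat.size_pos.mpr hn0pos
    have htle : t ≤ 2 ^ (t - 1) := pvT_le_pow t ht1
    have hlo : 2 ^ (t - 1) ≤ n0 := by
      have := Nat.lt_size.mp (show t - 1 < Nat.size n0 by omega)
      exact this
    have hhi : n0 < 2 ^ t := Nat.lt_size_self n0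
    have hused : n0 - t ≤ msg.toList.length := by omega
    -- A's side via the loop invariant
    rw [show ((msg.toList.length : Int)) + rbits + 1 = ((n0 : Nat) : Int) + 1 by omega,
      pvMain msg.toList n0 hused, if_neg hn]
    -- B's side: normalise the slices, then apply the run and block decompositions
    rw [hbl]
    rw [show ((msg.toList.length : Int)) - (((msg.toList.length : Int)) + rbits - (Nat.size n0 : Int)) =
        (((msg.toList.length - (n0 - t) : Nat)) : Int) by omega]
    rw [PySem.List.slice_from_natCast]
    set data : List Char := msg.toList.drop (msg.toList.length - (n0 - t)) with hdata
    have hdlen : data.length = n0 - t := by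
      rw [hdata, List.length_drop]; omega
    rw [show ((msg.toList.length : Int)) + rbits - ((2 ^ (t - 1) : Nat) : Int) =
        (((n0 - 2 ^ (t - 1) : Nat)) : Int) by omega]
    rw [PySem.List.slice_to_natCast, PySem.List.slice_from_natCast]
    set k : Nat := n0 - 2 ^ (t - 1) with hkdef
    have hkle : k ≤ data.length := by rw [hdlen]; omega
    rw [pvRun t k n0 data (by omega) hhi ht1 hkle]
    rw [pvBlock (t - 1) (data.drop k) (by rw [List.length_drop, hdlen]; omega)]
    simp [List.reverse_reverse]
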